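-- pv_equiv track=rewrite | github.com/CuriosityQuantified/save-the-world | services/llm_service.py | _parse_scenarios
-- ===== SOURCE A (Python) =====
-- from typing import Dict, Any, List, Optional, Callable, Awaitable
--
-- def _parse_scenarios(result: str) -> List[str]:
--     """
--     Parse scenario descriptions from the LLM result.
--
--     Args:
--         result: The raw LLM result
--
--     Returns:
--         List of scenario descriptions
--     """
--     # This is a simple implementation that assumes the LLM follows instructions
--     # to return a list of scenarios. A more robust implementation would use
--     # more sophisticated parsing.
--     scenarios = []
--     lines = result.strip().split('\n')
--     current_scenario = ""
--
--     for line in lines: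
--         if line.strip() and current_scenario:
--             current_scenario += " " + line.strip()
--         elif line.strip():
--             current_scenario = line.strip()
--         else:
--             if current_scenario:
--                 scenarios.append(current_scenario)
--                 current_scenario = ""
--
--     if current_scenario:
--         scenarios.append(current_scenario)
--
--     return scenarios
-- ===== SOURCE B (Python) =====
-- def _parse_scenarios(result: str):
--     """Partition-first re-implementation: strip every line, then scan
--     maximal runs of non-empty lines and join each run with spaces."""
--     lines = [ln.strip() for ln in result.strip().split('\n')]
--     scenarios = []
--     i, n = 0, len(lines)
--     while i < n:
--         if not lines[i]:
--             i += 1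
--             continue
--         j = i
--         while j < n and lines[j]:
--             j += 1
--         scenarios.append(' '.join(lines[i:j]))
--         i = j
--     return scenarios
-- ===== Notes on version B (the rewrite author's own statement) =====
-- stated objective: alternative
-- what changed: Replaces A's incremental accumulate-and-flush state machine (a mutable current_scenario updated per line) with a partition-first pass: strip all lines once, then cut the list into maximal runs of non-empty lines and join each run with spaces.
import Mathlib
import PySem

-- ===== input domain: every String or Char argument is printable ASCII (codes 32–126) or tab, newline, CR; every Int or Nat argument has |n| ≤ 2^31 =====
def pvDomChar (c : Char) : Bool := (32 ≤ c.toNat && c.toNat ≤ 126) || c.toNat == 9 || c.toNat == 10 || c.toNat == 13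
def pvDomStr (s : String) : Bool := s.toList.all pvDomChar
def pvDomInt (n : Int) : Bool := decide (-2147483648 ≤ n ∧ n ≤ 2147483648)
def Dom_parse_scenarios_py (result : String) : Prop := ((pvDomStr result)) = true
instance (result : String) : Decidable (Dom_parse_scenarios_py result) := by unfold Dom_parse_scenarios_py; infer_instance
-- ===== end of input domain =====

-- B replaces A's accumulate-and-flush state machine by a partition-first pass:
-- strip every line, then cut the line list into maximal runs of non-empty lines
-- and join each run with spaces (objective: alternative decomposition).

-- ===== PORT A =====
-- A's for-loop over the lines, state = (scenarios, current_scenario); char-list level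
def pvALoop : List (List Char) → List (List Char) → List Char → List (List Char)
  | [], scenarios, cur => if cur ≠ [] then scenarios ++ [cur] else scenarios
  | line :: ls, scenarios, cur =>
    if PySem.Chars.strip line ≠ [] ∧ cur ≠ [] then
      pvALoop ls scenarios (cur ++ [' '] ++ PySem.Chars.strip line)
    else if PySem.Chars.strip line ≠ [] then
      pvALoop ls scenarios (PySem.Chars.strip line)
    else if cur ≠ [] then
      pvALoop ls (scenarios ++ [cur]) []
    else
      pvALoop ls scenarios []

def parse_scenarios_py (result : String) : List String :=
  (pvALoop (PySem.Chars.splitOn (PySem.Chars.strip result.toList) ['\n']) [] []).map String.ofList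

-- ===== PORT B =====
-- B's outer while-loop: skip empty lines, take a maximal run of non-empty lines
-- (the inner while = takeWhile/dropWhile), join it with ' '
def pvBlocks : List (List Char) → List (List Char)
  | [] => []
  | l :: ls =>
    if l = [] then pvBlocks ls
    else PySem.Chars.join [' '] (l :: ls.takeWhile (· ≠ [])) ::
         pvBlocks (ls.dropWhile (· ≠ []))
termination_by ls => ls.length
decreasing_by
  · simp
  · have := List.length_dropWhile_le (fun x => decide (x ≠ [])) ls
    simp at this ⊢
    omega

def parse_scenarios_py_alt (result : String) : List String :=
  (pvBlocks ((PySem.Chars.splitOn (PySem.Chars.strip result.toList) ['\n']).map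
      PySem.Chars.strip)).map String.ofList

-- ===== PRECONDITION & SPEC =====
def Spec_parse_scenarios_py (result : String) (out : List String) : Prop := out = parse_scenarios_py_alt result
instance (result : String) (out : List String) : Decidable (Spec_parse_scenarios_py result out) := by unfold Spec_parse_scenarios_py; infer_instance

-- ===== CLAIM (what is proved, stated in full; the proofs are below) =====
def Claim_equal_parse_scenarios_py : Prop := ∀ (result : String), Dom_parse_scenarios_py result → Spec_parse_scenarios_py result (parse_scenarios_py result)

-- ===== LEMMAS AND PROOFS =====

-- B's value when a partial scenario `cur` is still pending in A's state
def pvWithCur (cur : List Char) (ms : List (List Char)) : List (List Char) :=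
  if cur = [] then pvBlocks ms
  else PySem.Chars.join [' '] (cur :: ms.takeWhile (· ≠ [])) ::
       pvBlocks (ms.dropWhile (· ≠ []))

theorem pvJoin_merge (sep a b : List Char) (l : List (List Char)) :
    PySem.Chars.join sep (a :: b :: l) = PySem.Chars.join sep ((a ++ sep ++ b) :: l) := by
  cases l with
  | nil => simp [PySem.Chars.join_cons_cons, PySem.Chars.join_singleton]
  | cons t ts =>
      simp [PySem.Chars.join_cons_cons, List.append_assoc]

theorem pvALoop_eq (ls : List (List Char)) :
    ∀ (acc : List (List Char)) (cur : List Char),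
      pvALoop ls acc cur = acc ++ pvWithCur cur (ls.map PySem.Chars.strip) := by
  induction ls with
  | nil =>
      intro acc cur
      by_cases h : cur = [] <;> simp [pvALoop, pvWithCur, pvBlocks, h, PySem.Chars.join_singleton]
  | cons l ls ih =>
      intro acc cur
      by_cases hs : PySem.Chars.strip l = [] <;> by_cases hc : cur = []
      · -- blank line, no pending scenario
        simp [pvALoop, hs, hc, ih, pvWithCur, pvBlocks]
      · -- blank line, flush cur
        simp [pvALoop, hs, hc, ih, pvWithCur, pvBlocks]
      · -- non-blank line, start a new scenario
        simp only [pvALoop, hc]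
        simp [ih, pvWithCur, pvBlocks, hs]
      · -- non-blank line, extend cur
        simp only [pvALoop]
        simp [ih, pvWithCur, hc, hs, pvJoin_merge]

-- ===== VERDICT (by name: the statement is the Claim_ definition above) =====
theorem parse_scenarios_py_spec : Claim_equal_parse_scenarios_py := by
  intro result _
  unfold Spec_parse_scenarios_py parse_scenarios_py parse_scenarios_py_alt
  rw [pvALoop_eq]
  simp [pvWithCur]
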